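-- pv_equiv track=rewrite | github.com/zanderbraam/slt-itemgen | src/prompting.py | filter_unique_items
-- ===== SOURCE A (Python) =====
-- def filter_unique_items(items: list[str], previous_items: list[str]) -> list[str]:
--     """Filters a list of items to include only those not present in previous_items.
--
--     Args:
--         items: The list of newly generated items.
--         previous_items: The list of items generated in previous runs.
--
--     Returns:
--         A list containing only the unique new items.
--     """
--     new_unique_items = []
--     seen_items = set(previous_items) # Use set for efficient lookup
--     for item in items:
--         if item not in seen_items:
--             new_unique_items.append(item)
--             seen_items.add(item) # Add to seen immediately to handle duplicates within the new list
--     return new_unique_items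
-- ===== SOURCE B (Python) =====
-- def filter_unique_items(items: list[str], previous_items: list[str]) -> list[str]:
--     unique = list(dict.fromkeys(items))
--     prev = set(previous_items)
--     return [x for x in unique if x not in prev]
-- ===== Notes on version B (the rewrite author's own statement) =====
-- stated objective: idiomatic
-- what changed: Replaces the single interleaved loop that grows one seen-set with two separate passes: an order-preserving dedup via dict.fromkeys, then a comprehension filtering against a set of previous_items.
import Mathlib
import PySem

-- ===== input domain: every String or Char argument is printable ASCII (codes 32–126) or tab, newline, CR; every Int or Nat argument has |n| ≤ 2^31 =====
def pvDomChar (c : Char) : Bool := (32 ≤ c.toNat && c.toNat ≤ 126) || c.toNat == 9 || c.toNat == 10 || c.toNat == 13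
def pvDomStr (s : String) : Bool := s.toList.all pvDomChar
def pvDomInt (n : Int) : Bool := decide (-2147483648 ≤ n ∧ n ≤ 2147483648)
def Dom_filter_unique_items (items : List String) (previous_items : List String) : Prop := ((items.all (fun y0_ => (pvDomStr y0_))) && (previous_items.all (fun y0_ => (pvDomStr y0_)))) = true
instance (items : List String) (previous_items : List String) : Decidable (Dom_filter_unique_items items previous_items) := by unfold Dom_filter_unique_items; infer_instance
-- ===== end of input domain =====

-- B replaces the single interleaved loop growing one seen-set with two separate passes (ordered dedup, then filter against set(previous_items)); objective: idiomatic, same cost.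

-- ===== PORT A =====
def filter_unique_items (items : List String) (previous_items : List String) : List String :=
  (items.foldl
    (fun (st : List String × PySem.Set String) item =>
      if PySem.Set.contains st.2 item then st
      else (st.1 ++ [item], PySem.Set.add st.2 item))
    ([], PySem.Set.ofList previous_items)).1

-- ===== PORT B =====
def filter_unique_items_alt (items : List String) (previous_items : List String) : List String :=
  let unique := PySem.List.dedup items
  let prev := PySem.Set.ofList previous_items
  unique.filter (fun x => !(PySem.Set.contains prev x))

-- ===== PRECONDITION & SPEC =====
def Spec_filter_unique_items (items : List String) (previous_items : List String) (out : List String) : Prop := out = filter_unique_items_alt items previous_items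
instance (items : List String) (previous_items : List String) (out : List String) : Decidable (Spec_filter_unique_items items previous_items out) := by unfold Spec_filter_unique_items; infer_instance

-- ===== CLAIM (what is proved, stated in full; the proofs are below) =====
def Claim_equal_filter_unique_items : Prop := ∀ (items : List String) (previous_items : List String), Dom_filter_unique_items items previous_items → Spec_filter_unique_items items previous_items (filter_unique_items items previous_items)

-- ===== LEMMAS AND PROOFS =====
lemma fui_loop (items : List String) (acc : List String) (seen : List String) :
    (items.foldl
      (fun (st : List String × PySem.Set String) item =>
        if PySem.Set.contains st.2 item then st
        else (st.1 ++ [item], PySem.Set.add st.2 item))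
      (acc, seen)).1
    = acc ++ (PySem.List.dedup items).filter (fun x => !(PySem.Set.contains seen x)) := by
  induction items generalizing acc seen with
  | nil => simp
  | cons item rest ih =>
    simp only [List.foldl_cons, PySem.List.dedup_eq_ofList, PySem.Set.ofList_cons] at *
    by_cases h : item ∈ seen
    · have hc : PySem.Set.contains seen item = true := by
        simpa [PySem.Set.contains_iff] using h
      rw [if_pos hc, ih]
      congr 1
      simp only [List.filter_cons, hc, Bool.not_true, PySem.Set.discard,
        List.filter_filter]
      apply List.filter_congr
      intro x hx
      by_cases hxe : x = item
      · subst hxe; simp [h]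
      · simp [hxe]
    · have hc : ¬ (PySem.Set.contains seen item = true) := by
        simpa [PySem.Set.contains_iff] using h
      rw [if_neg hc, PySem.Set.add_of_not_mem h, ih]
      simp only [List.filter_cons, Bool.not_eq_eq_eq_not, Bool.not_true,
        List.append_assoc, List.singleton_append, PySem.Set.discard,
        List.filter_filter, Bool.not_true] at *
      rw [if_pos (by simpa [PySem.Set.contains_iff] using h)]
      congr 2
      apply List.filter_congr
      intro x hx
      by_cases hxe : x = item
      · subst hxe; simp
      · simp [hxe]

-- ===== VERDICT (by name: the statement is the Claim_ definition above) =====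
theorem filter_unique_items_spec : Claim_equal_filter_unique_items := by
  intro items previous_items _
  unfold Spec_filter_unique_items filter_unique_items filter_unique_items_alt
  rw [fui_loop]
  rfl
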